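-- pv_equiv track=rewrite | github.com/ayoubzulfiqar/Leetcode-Medium | AllPeopleReporttotheGivenManager/all_people_report_to_the_given_manager.py | get_all_reporters
-- ===== SOURCE A (Python) =====
-- import collections
--
-- def get_all_reporters(relations, given_manager_id):
--     manager_to_direct_reports = collections.defaultdict(list)
--     for employee, manager in relations:
--         manager_to_direct_reports[manager].append(employee)
--
--     all_reporters = []
--     queue = collections.deque()
--
--     if given_manager_id in manager_to_direct_reports:
--         for direct_report in manager_to_direct_reports[given_manager_id]:
--             queue.append(direct_report)
--             all_reporters.append(direct_report)
--
--     while queue: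
--         current_person = queue.popleft()
--         if current_person in manager_to_direct_reports:
--             for subordinate in manager_to_direct_reports[current_person]:
--                 all_reporters.append(subordinate)
--                 queue.append(subordinate)
--
--     return sorted(list(set(all_reporters)))
-- ===== SOURCE B (Python) =====
-- def get_all_reporters(relations, given_manager_id):
--     frontier = {given_manager_id}
--     result = set()
--     for _ in range(len(relations)):
--         frontier = {e for e, m in relations if m in frontier}
--         result |= frontier
--     return sorted(result)
-- ===== Notes on version B (the rewrite author's own statement) =====
-- stated objective: simpler
-- what changed: Replaces the defaultdict-of-lists plus deque node-by-node BFS with len(relations) rounds of whole-frontier expansion over set comprehensions (level sets accumulated into one result set), eliminating the dict, the queue and the per-node bookkeeping; Pre_ excludes only inputs with a cycle reachable from given_manager_id, on which A's while-loop never returns.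
import Mathlib
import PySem

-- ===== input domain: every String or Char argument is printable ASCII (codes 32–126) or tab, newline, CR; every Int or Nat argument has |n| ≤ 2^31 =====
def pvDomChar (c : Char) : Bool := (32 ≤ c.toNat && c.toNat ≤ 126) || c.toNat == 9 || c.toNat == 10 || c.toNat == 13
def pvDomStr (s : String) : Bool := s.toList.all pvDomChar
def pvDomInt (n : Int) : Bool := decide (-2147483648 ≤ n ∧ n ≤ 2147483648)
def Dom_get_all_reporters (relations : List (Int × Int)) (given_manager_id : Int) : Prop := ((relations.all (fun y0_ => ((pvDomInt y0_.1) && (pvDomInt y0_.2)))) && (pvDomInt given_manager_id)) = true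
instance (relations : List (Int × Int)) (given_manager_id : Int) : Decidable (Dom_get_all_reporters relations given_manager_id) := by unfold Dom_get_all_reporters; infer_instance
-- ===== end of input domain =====

-- B replaces A's defaultdict + deque BFS by len(relations) rounds of whole-frontier set
-- expansion (simpler: no dict, no queue); equal return value on Pre_ (no cycle reachable
-- from the given manager — on inputs with such a cycle A's while-loop never returns).


-- ===== PORT A =====
-- the while-loop of A, structurally recursive on a fuel counter; the fuel passed below,
-- (n+1)^(n+1) for n = relations.length, bounds the number of loop iterations whenever the
-- Python loop terminates (the iterations enumerate manager chains, which are node-distinct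
-- when no reachable cycle exists), so on those inputs the port computes exactly what A computes
def pvBfsA (d : PySem.Dict Int (List Int)) : Nat → List Int → List Int → List Int
  | 0, _, out => out
  | _ + 1, [], out => out
  | fuel + 1, cur :: qs, out =>
      if d.contains cur then
        pvBfsA d fuel (qs ++ d.getD cur []) (out ++ d.getD cur [])
      else
        pvBfsA d fuel qs out

def get_all_reporters (relations : List (Int × Int)) (given_manager_id : Int) : List Int :=
  -- manager_to_direct_reports: defaultdict(list); [manager].append(employee)
  let d : PySem.Dict Int (List Int) :=
    relations.foldl (fun d p => d.modify p.2 [] (fun l => l ++ [p.1])) PySem.Dict.empty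
  -- initial loop: queue and all_reporters both receive the direct reports of the manager
  let init : List Int := if d.contains given_manager_id then d.getD given_manager_id [] else []
  let all_reporters := pvBfsA d ((relations.length + 1) ^ (relations.length + 1)) init init
  PySem.List.sorted (PySem.Set.ofList all_reporters) (fun x => x) false

-- ===== PORT B =====
def get_all_reporters_alt (relations : List (Int × Int)) (given_manager_id : Int) : List Int :=
  let st :=
    (PySem.List.pyRange 0 relations.length 1).foldl
      (fun (st : PySem.Set Int × PySem.Set Int) _ =>
        let fr : PySem.Set Int :=
          PySem.Set.ofList (relations.filterMap (fun p => if p.2 ∈ st.1 then some p.1 else none))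
        (fr, PySem.Set.union st.2 fr))
      (PySem.Set.ofList [given_manager_id], PySem.Set.empty)
  PySem.List.sorted st.2 (fun x => x) false

-- ===== PRECONDITION & SPEC =====
-- helpers for Pre_ (independent of both ports): one frontier-expansion step, and the list
-- of all nodes reachable from g in 1..relations.length steps
def pvStep (relations : List (Int × Int)) (s : List Int) : List Int :=
  (relations.filter (fun p => p.2 ∈ s)).map Prod.fst

def pvDescend (relations : List (Int × Int)) (g : Int) : List Int :=
  ((List.range relations.length).foldl
    (fun (st : List Int × List Int) _ => (pvStep relations st.1, st.2 ++ pvStep relations st.1))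
    ([g], [])).2

-- Pre_ excludes exactly the inputs with a cycle reachable from given_manager_id: on those
-- A's while-loop keeps re-enqueueing the cycle and never returns.
def Pre_get_all_reporters (relations : List (Int × Int)) (given_manager_id : Int) : Prop :=
  ∀ x ∈ pvDescend relations given_manager_id, x ∉ pvDescend relations x

instance (relations : List (Int × Int)) (given_manager_id : Int) : Decidable (Pre_get_all_reporters relations given_manager_id) := by unfold Pre_get_all_reporters; infer_instance

def pvWitness_get_all_reporters : (List (Int × Int)) × Int := ([(2, 1), (3, 1), (4, 2), (5, 2), (4, 1)], 1)

def Spec_get_all_reporters (relations : List (Int × Int)) (given_manager_id : Int) (out : List Int) : Prop := out = get_all_reporters_alt relations given_manager_id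
instance (relations : List (Int × Int)) (given_manager_id : Int) (out : List Int) : Decidable (Spec_get_all_reporters relations given_manager_id out) := by unfold Spec_get_all_reporters; infer_instance

-- ===== CLAIM (what is proved, stated in full; the proofs are below) =====
def Claim_equal_get_all_reporters : Prop := ∀ (relations : List (Int × Int)) (given_manager_id : Int), Dom_get_all_reporters relations given_manager_id → Pre_get_all_reporters relations given_manager_id → Spec_get_all_reporters relations given_manager_id (get_all_reporters relations given_manager_id)

-- ===== LEMMAS AND PROOFS =====

-- children of a manager m: the employees listed under m, in relation order (with multiplicity)
def pvChildren (relations : List (Int × Int)) (m : Int) : List Int :=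
  (relations.filter (fun p => p.2 == m)).map Prod.fst

-- a path: starting at a node, each element is a child of the previous one
def pvIsPath (relations : List (Int × Int)) : Int → List Int → Prop
  | _, [] => True
  | m, x :: l => x ∈ pvChildren relations m ∧ pvIsPath relations x l

def pvReach (relations : List (Int × Int)) (g x : Int) : Prop :=
  ∃ l, pvIsPath relations g (l ++ [x])

def pvPathN (relations : List (Int × Int)) (g x : Int) (k : Nat) : Prop :=
  ∃ l, pvIsPath relations g (l ++ [x]) ∧ l.length + 1 = k

theorem pv_mem_children {relations : List (Int × Int)} {m x : Int} :
    x ∈ pvChildren relations m ↔ (x, m) ∈ relations := by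
  simp only [pvChildren, List.mem_map, List.mem_filter]
  constructor
  · rintro ⟨⟨a, b⟩, ⟨hm, he⟩, rfl⟩
    simp only [beq_iff_eq] at he; subst he; exact hm
  · intro h; exact ⟨(x, m), ⟨h, by simp⟩, rfl⟩

theorem pv_children_sublist (relations : List (Int × Int)) (m : Int) :
    (pvChildren relations m).Sublist (relations.map Prod.fst) :=
  (relations.filter_sublist).map Prod.fst

theorem pv_len_le_of_nodup_subset {l1 l2 : List Int} (h1 : l1.Nodup) (h : l1 ⊆ l2) :
    l1.length ≤ l2.length := by
  calc l1.length = l1.toFinset.card := (List.toFinset_card_of_nodup h1).symm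
    _ ≤ l2.toFinset.card := Finset.card_le_card (by intro a ha; simp only [List.mem_toFinset] at ha ⊢; exact h ha)
    _ ≤ l2.length := l2.toFinset_card_le

theorem pv_isPath_append {relations : List (Int × Int)} (m : Int) (u v : List Int) :
    pvIsPath relations m (u ++ v) ↔ pvIsPath relations m u ∧ pvIsPath relations (u.getLastD m) v := by
  induction u generalizing m with
  | nil => simp [pvIsPath]
  | cons a u ih =>
    have hlast : (a :: u).getLastD m = u.getLastD a := by cases u <;> simp [List.getLastD]
    rw [hlast]
    simp only [List.cons_append, pvIsPath, ih a, and_assoc]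

theorem pv_path_mem_E {relations : List (Int × Int)} {m : Int} {l : List Int}
    (h : pvIsPath relations m l) : ∀ x ∈ l, x ∈ relations.map Prod.fst := by
  induction l generalizing m with
  | nil => intro x hx; cases hx
  | cons a t ih =>
    obtain ⟨ha, ht⟩ := h
    intro x hx
    rcases List.mem_cons.mp hx with rfl | hx'
    · exact (pv_children_sublist relations m).subset ha
    · exact ih ht x hx'

theorem pv_shorten {relations : List (Int × Int)} {g x : Int} :
    ∀ l, pvIsPath relations g (l ++ [x]) →
      ∃ l', pvIsPath relations g (l' ++ [x]) ∧ (l' ++ [x]).Nodup ∧ l'.length ≤ l.length := by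
  intro l
  induction hn : l.length using Nat.strong_induction_on generalizing l with
  | _ n ih =>
  subst hn
  intro hp
  by_cases hnd : (l ++ [x]).Nodup
  · exact ⟨l, hp, hnd, le_rfl⟩
  · rw [List.nodup_iff_sublist] at hnd
    simp only [not_forall, not_not] at hnd
    obtain ⟨a, ha⟩ := hnd
    rw [List.cons_sublist_iff] at ha
    obtain ⟨r1, r2, hl, har1, ha2⟩ := ha
    have har2 : a ∈ r2 := ha2.subset (by simp)
    obtain ⟨u1, u2, hu⟩ := List.append_of_mem har1
    obtain ⟨v1, v2, hv⟩ := List.append_of_mem har2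
    have hfull : l ++ [x] = (u1 ++ [a]) ++ ((u2 ++ v1) ++ (a :: v2)) := by
      rw [hl, hu, hv]; simp
    have hp2 : pvIsPath relations g ((u1 ++ [a]) ++ ((u2 ++ v1) ++ (a :: v2))) := hfull ▸ hp
    have hlast : (u1 ++ [a]).getLastD g = a := by simp
    have hpa : pvIsPath relations g (u1 ++ [a]) := ((pv_isPath_append _ _ _).mp hp2).1
    have htail := ((pv_isPath_append _ _ _).mp hp2).2
    have hstep : pvIsPath relations a v2 :=
      (((pv_isPath_append _ _ _).mp htail).2 : pvIsPath relations _ (a :: v2)).2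
    have hlen := congrArg List.length hfull
    simp [List.length_append] at hlen
    rcases List.eq_nil_or_concat v2 with hv2 | ⟨v2', y, hv2⟩
    · -- v2 = [], so a = x and u1 ++ [x] is a shorter candidate
      subst hv2
      have hax : a = x := by
        have h1 := congrArg List.getLast? hfull
        rw [show (u1 ++ [a]) ++ ((u2 ++ v1) ++ (a :: ([] : List Int))) = (u1 ++ [a] ++ (u2 ++ v1)) ++ [a] by simp] at h1
        simp only [List.getLast?_append, List.getLast?_singleton] at h1
        injection h1 with h1; exact h1.symm
      subst hax
      obtain ⟨l', h1, h2, h3⟩ := ih u1.length (by omega) u1 rfl hpa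
      exact ⟨l', h1, h2, by omega⟩
    · -- v2 = v2' ++ [y]; y is the final x, shorter candidate u1 ++ a :: v2'
      subst hv2
      simp only [List.concat_eq_append, List.length_append, List.length_cons, List.length_nil] at hlen
      have hyx : y = x := by
        have h1 := congrArg List.getLast? hfull
        rw [show (u1 ++ [a]) ++ ((u2 ++ v1) ++ (a :: (v2'.concat y))) = (u1 ++ [a] ++ (u2 ++ v1) ++ a :: v2') ++ [y] by simp] at h1
        simp only [List.getLast?_append, List.getLast?_singleton] at h1
        injection h1 with h1; exact h1.symm
      rw [hyx, List.concat_eq_append] at hstep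
      have hp' : pvIsPath relations g ((u1 ++ a :: v2') ++ [x]) := by
        have : pvIsPath relations g ((u1 ++ [a]) ++ (v2' ++ [x])) :=
          (pv_isPath_append _ _ _).mpr ⟨hpa, by rw [hlast]; exact hstep⟩
        simpa using this
      obtain ⟨l', h1, h2, h3⟩ := ih (u1 ++ a :: v2').length (by simp; omega) _ rfl hp'
      exact ⟨l', h1, h2, by simp at h3 ⊢; omega⟩

theorem pv_reach_bounded {relations : List (Int × Int)} {g x : Int}
    (h : pvReach relations g x) :
    ∃ k, 1 ≤ k ∧ k ≤ relations.length ∧ pvPathN relations g x k := by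
  obtain ⟨l, hp⟩ := h
  obtain ⟨l', h1, h2, _⟩ := pv_shorten l hp
  have hsub : (l' ++ [x]) ⊆ relations.map Prod.fst := fun y hy => pv_path_mem_E h1 y hy
  have hlen : (l' ++ [x]).length ≤ relations.length := by
    have := pv_len_le_of_nodup_subset h2 hsub
    simpa using this
  exact ⟨l'.length + 1, by omega, by simpa using hlen, ⟨l', h1, rfl⟩⟩

theorem pv_pathN_one {relations : List (Int × Int)} {g x : Int} :
    pvPathN relations g x 1 ↔ (x, g) ∈ relations := by
  constructor
  · rintro ⟨l, hp, hl⟩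
    have : l = [] := by cases l with | nil => rfl | cons a t => simp at hl
    subst this
    exact pv_mem_children.mp hp.1
  · intro h
    exact ⟨[], ⟨pv_mem_children.mpr h, trivial⟩, rfl⟩

theorem pv_pathN_succ {relations : List (Int × Int)} {g x : Int} {j : Nat} (hj : 1 ≤ j) :
    pvPathN relations g x (j + 1) ↔ ∃ m, pvPathN relations g m j ∧ (x, m) ∈ relations := by
  constructor
  · rintro ⟨l, hp, hl⟩
    have hne : l ≠ [] := by rintro rfl; simp at hl; omega
    obtain ⟨l0, m, rfl⟩ := List.eq_nil_or_concat l |>.resolve_left hne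
    rw [List.concat_eq_append] at hp hl
    have h1 := (pv_isPath_append g (l0 ++ [m]) [x]).mp (by simpa using hp)
    have hlast : (l0 ++ [m]).getLastD g = m := by simp
    refine ⟨m, ⟨l0, h1.1, by simpa using hl⟩, ?_⟩
    have := h1.2
    rw [hlast] at this
    exact pv_mem_children.mp this.1
  · rintro ⟨m, ⟨l, hp, hl⟩, he⟩
    refine ⟨l ++ [m], ?_, by simpa using hl⟩
    refine (pv_isPath_append g (l ++ [m]) [x]).mpr ⟨by simpa using hp, ?_⟩
    have hlast : (l ++ [m]).getLastD g = m := by simp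
    rw [hlast]
    exact ⟨pv_mem_children.mpr he, trivial⟩

theorem pv_sat_mem (relations : List (Int × Int)) (g : Int)
    (F : (List Int × List Int) → (List Int × List Int))
    (hF1 : ∀ st x, x ∈ (F st).1 ↔ ∃ m ∈ st.1, (x, m) ∈ relations)
    (hF2 : ∀ st x, x ∈ (F st).2 ↔ x ∈ st.2 ∨ x ∈ (F st).1)
    (init : List Int × List Int)
    (hi1 : ∀ x, x ∈ init.1 ↔ x = g) (hi2 : ∀ x, x ∉ init.2) :
    ∀ j, (∀ x, x ∈ (F^[j] init).1 ↔ ((j = 0 ∧ x = g) ∨ pvPathN relations g x j))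
       ∧ (∀ x, x ∈ (F^[j] init).2 ↔ ∃ k, 1 ≤ k ∧ k ≤ j ∧ pvPathN relations g x k) := by
  intro j
  induction j with
  | zero =>
    refine ⟨fun x => ?_, fun x => ?_⟩
    · simpa using (hi1 x).trans (by simp [pvPathN])
    · simp only [Function.iterate_zero, id]
      constructor
      · intro h; exact absurd h (hi2 x)
      · rintro ⟨k, hk1, hk2, _⟩; omega
  | succ j ih =>
    rw [Function.iterate_succ_apply']
    refine ⟨fun x => ?_, fun x => ?_⟩
    · rw [hF1]
      constructor
      · rintro ⟨m, hm, he⟩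
        rcases (ih.1 m).mp hm with ⟨rfl, rfl⟩ | hpn
        · exact Or.inr (pv_pathN_one.mpr he)
        · have hj1 : 1 ≤ j := by
            rcases Nat.eq_zero_or_pos j with rfl | h
            · exact absurd hpn (by rintro ⟨l, _, hl⟩; omega)
            · exact h
          exact Or.inr ((pv_pathN_succ hj1).mpr ⟨m, hpn, he⟩)
      · rintro (⟨h0, _⟩ | hpn)
        · omega
        · rcases Nat.eq_zero_or_pos j with rfl | hj1
          · exact ⟨g, (ih.1 g).mpr (Or.inl ⟨rfl, rfl⟩), pv_pathN_one.mp hpn⟩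
          · obtain ⟨m, hm, he⟩ := (pv_pathN_succ hj1).mp hpn
            exact ⟨m, (ih.1 m).mpr (Or.inr hm), he⟩
    · rw [hF2, ih.2]
      constructor
      · rintro (⟨k, h1, h2, h3⟩ | hfr)
        · exact ⟨k, h1, by omega, h3⟩
        · have := (hF1 _ x).mp hfr
          obtain ⟨m, hm, he⟩ := this
          rcases (ih.1 m).mp hm with ⟨rfl, rfl⟩ | hpn
          · exact ⟨1, le_rfl, by omega, pv_pathN_one.mpr he⟩
          · have hj1 : 1 ≤ j := by
              rcases Nat.eq_zero_or_pos j with rfl | h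
              · exact absurd hpn (by rintro ⟨l, _, hl⟩; omega)
              · exact h
            exact ⟨j + 1, by omega, le_rfl, (pv_pathN_succ hj1).mpr ⟨m, hpn, he⟩⟩
      · rintro ⟨k, h1, h2, h3⟩
        rcases Nat.lt_or_ge k (j + 1) with hk | hk
        · exact Or.inl ⟨k, h1, by omega, h3⟩
        · have hkj : k = j + 1 := by omega
          subst hkj
          right
          rw [hF1]
          rcases Nat.eq_zero_or_pos j with rfl | hj1
          · exact ⟨g, (ih.1 g).mpr (Or.inl ⟨rfl, rfl⟩), pv_pathN_one.mp h3⟩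
          · obtain ⟨m, hm, he⟩ := (pv_pathN_succ hj1).mp h3
            exact ⟨m, (ih.1 m).mpr (Or.inr hm), he⟩

theorem pv_mem_step {relations : List (Int × Int)} {s : List Int} {x : Int} :
    x ∈ pvStep relations s ↔ ∃ m ∈ s, (x, m) ∈ relations := by
  simp only [pvStep, List.mem_map, List.mem_filter]
  constructor
  · rintro ⟨⟨a, b⟩, ⟨hm, hb⟩, rfl⟩
    exact ⟨b, by simpa using hb, hm⟩
  · rintro ⟨m, hm, he⟩
    exact ⟨(x, m), ⟨he, by simpa using hm⟩, rfl⟩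

theorem pv_descend_mem {relations : List (Int × Int)} {g x : Int} :
    x ∈ pvDescend relations g ↔ ∃ k, 1 ≤ k ∧ k ≤ relations.length ∧ pvPathN relations g x k := by
  unfold pvDescend
  rw [List.foldl_const (fun (st : List Int × List Int) => (pvStep relations st.1, st.2 ++ pvStep relations st.1)) ([g], []) (List.range relations.length)]
  rw [List.length_range]
  exact (pv_sat_mem relations g _
    (fun st y => by simpa using (pv_mem_step (s := st.1) (x := y)))
    (fun st y => by simp)
    ([g], []) (fun y => by simp) (fun y => by simp) relations.length).2 x

theorem pv_alt_F1 (relations : List (Int × Int)) (st : PySem.Set Int × PySem.Set Int) (x : Int) :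
    x ∈ PySem.Set.ofList (relations.filterMap (fun p => if p.2 ∈ st.1 then some p.1 else none))
      ↔ ∃ m ∈ st.1, (x, m) ∈ relations := by
  rw [PySem.Set.mem_ofList, List.mem_filterMap]
  constructor
  · rintro ⟨⟨a, b⟩, hm, hb⟩
    by_cases h : b ∈ st.1
    · simp only [h, if_pos] at hb
      injection hb with hb; subst hb
      exact ⟨b, h, hm⟩
    · simp [h] at hb
  · rintro ⟨m, hm, he⟩
    exact ⟨(x, m), he, by simp [hm]⟩

theorem pv_alt_fold_eq (relations : List (Int × Int)) (g : Int) :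
    ((PySem.List.pyRange 0 relations.length 1).foldl
      (fun (st : PySem.Set Int × PySem.Set Int) _ =>
        let fr : PySem.Set Int :=
          PySem.Set.ofList (relations.filterMap (fun p => if p.2 ∈ st.1 then some p.1 else none))
        (fr, PySem.Set.union st.2 fr))
      (PySem.Set.ofList [g], PySem.Set.empty))
    = (fun (st : PySem.Set Int × PySem.Set Int) =>
        (PySem.Set.ofList (relations.filterMap (fun p => if p.2 ∈ st.1 then some p.1 else none)),
         PySem.Set.union st.2 (PySem.Set.ofList (relations.filterMap (fun p => if p.2 ∈ st.1 then some p.1 else none)))))^[relations.length]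
      (PySem.Set.ofList [g], PySem.Set.empty) := by
  rw [List.foldl_const]
  congr 1
  simp [PySem.List.length_pyRange_one]

theorem pv_alt_fold_mem (relations : List (Int × Int)) (g x : Int) :
    (x ∈ ((PySem.List.pyRange 0 relations.length 1).foldl
      (fun (st : PySem.Set Int × PySem.Set Int) _ =>
        let fr : PySem.Set Int :=
          PySem.Set.ofList (relations.filterMap (fun p => if p.2 ∈ st.1 then some p.1 else none))
        (fr, PySem.Set.union st.2 fr))
      (PySem.Set.ofList [g], PySem.Set.empty)).2)
      ↔ ∃ k, 1 ≤ k ∧ k ≤ relations.length ∧ pvPathN relations g x k := by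
  rw [pv_alt_fold_eq]
  exact (pv_sat_mem relations g _
    (fun st y => by simpa using pv_alt_F1 relations st y)
    (fun st y => by simp [PySem.Set.mem_union])
    _ (fun y => by simp [PySem.Set.mem_ofList]) (fun y => by simp [PySem.Set.empty]) relations.length).2 x

theorem pv_alt_fold_nodup (relations : List (Int × Int)) (g : Int) :
    ((PySem.List.pyRange 0 relations.length 1).foldl
      (fun (st : PySem.Set Int × PySem.Set Int) _ =>
        let fr : PySem.Set Int :=
          PySem.Set.ofList (relations.filterMap (fun p => if p.2 ∈ st.1 then some p.1 else none))
        (fr, PySem.Set.union st.2 fr))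
      (PySem.Set.ofList [g], PySem.Set.empty)).2.Nodup := by
  rw [pv_alt_fold_eq]
  generalize relations.length = n
  induction n with
  | zero => simp [PySem.Set.empty]
  | succ n ih =>
    rw [Function.iterate_succ_apply']
    exact PySem.Set.nodup_union _ _ ih

theorem pv_dict_getD (relations : List (Int × Int)) (m : Int) :
    (relations.foldl (fun d p => d.modify p.2 [] (fun l => l ++ [p.1])) PySem.Dict.empty).getD m []
      = pvChildren relations m := by
  have h1 : (relations.foldl (fun d p => d.modify p.2 [] (fun l => l ++ [p.1])) PySem.Dict.empty)
      = (relations.map Prod.swap).foldl (fun d p => d.modify p.1 [] (fun l => l ++ [p.2])) PySem.Dict.empty := by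
    rw [List.foldl_map]
    rfl
  rw [h1, PySem.Dict.getD_foldl_modify_append]
  rw [List.filter_map]
  simp only [List.map_map, PySem.Dict.getD_empty, List.nil_append]
  rfl

theorem pv_bfs_step (relations : List (Int × Int))
    {d : PySem.Dict Int (List Int)} (hd : ∀ c, d.getD c [] = pvChildren relations c)
    (fuel : Nat) (cur : Int) (qs out : List Int) :
    pvBfsA d (fuel + 1) (cur :: qs) out
      = pvBfsA d fuel (qs ++ pvChildren relations cur) (out ++ pvChildren relations cur) := by
  by_cases h : d.contains cur
  · simp only [pvBfsA, h, if_true, hd]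
  · have h0 : pvChildren relations cur = [] := by
      rw [← hd cur]
      exact PySem.Dict.getD_of_not_contains d [] (Bool.eq_false_iff.mpr h)
    simp [pvBfsA, h, h0]

-- reach concatenation and reach of a path member
theorem pv_reach_trans {relations : List (Int × Int)} {g c y : Int}
    (h1 : pvReach relations g c) (h2 : pvReach relations c y) : pvReach relations g y := by
  obtain ⟨l1, hp1⟩ := h1
  obtain ⟨l2, hp2⟩ := h2
  refine ⟨l1 ++ c :: l2, ?_⟩
  have : pvIsPath relations g ((l1 ++ [c]) ++ (l2 ++ [y])) := by
    refine (pv_isPath_append _ _ _).mpr ⟨hp1, ?_⟩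
    have hlast : (l1 ++ [c]).getLastD g = c := by simp
    rw [hlast]; exact hp2
  simpa using this

theorem pv_reach_of_mem_path {relations : List (Int × Int)} {g y : Int} {L : List Int}
    (hp : pvIsPath relations g L) (hy : y ∈ L) : pvReach relations g y := by
  obtain ⟨u, v, rfl⟩ := List.append_of_mem hy
  have : pvIsPath relations g ((u ++ [y]) ++ v) := by simpa using hp
  exact ⟨u, ((pv_isPath_append _ _ _).mp this).1⟩

-- a non-nodup path contains a node lying on a cycle
theorem pv_dup_cycle {relations : List (Int × Int)} {s : Int} {L : List Int}
    (hp : pvIsPath relations s L) (hnd : ¬ L.Nodup) :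
    ∃ y ∈ L, pvReach relations y y := by
  rw [List.nodup_iff_sublist] at hnd
  simp only [not_forall, not_not] at hnd
  obtain ⟨a, ha⟩ := hnd
  rw [List.cons_sublist_iff] at ha
  obtain ⟨r1, r2, hl, har1, ha2⟩ := ha
  have har2 : a ∈ r2 := ha2.subset (by simp)
  obtain ⟨u1, u2, hu⟩ := List.append_of_mem har1
  obtain ⟨v1, v2, hv⟩ := List.append_of_mem har2
  have hfull : L = (u1 ++ [a]) ++ (((u2 ++ v1) ++ [a]) ++ v2) := by
    rw [hl, hu, hv]; simp
  have hp2 : pvIsPath relations s ((u1 ++ [a]) ++ (((u2 ++ v1) ++ [a]) ++ v2)) := hfull ▸ hp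
  have hlast : (u1 ++ [a]).getLastD s = a := by simp
  have htail : pvIsPath relations a (((u2 ++ v1) ++ [a]) ++ v2) := by
    have := ((pv_isPath_append _ _ _).mp hp2).2
    rwa [hlast] at this
  have hcyc : pvReach relations a a :=
    ⟨u2 ++ v1, ((pv_isPath_append _ _ _).mp htail).1⟩
  exact ⟨a, by rw [hfull]; simp, hcyc⟩

-- all paths from a node have length ≤ m
def pvBnd (relations : List (Int × Int)) (c : Int) (m : Nat) : Prop :=
  ∀ (l : List Int) (x : Int), pvIsPath relations c (l ++ [x]) → l.length + 1 ≤ m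

theorem pvBnd_mono {relations : List (Int × Int)} {c : Int} {m m' : Nat}
    (h : pvBnd relations c m) (hm : m ≤ m') : pvBnd relations c m' :=
  fun l x hp => le_trans (h l x hp) hm

theorem pvBnd_child {relations : List (Int × Int)} {c x : Int} {m : Nat}
    (h : pvBnd relations c (m + 1)) (hx : x ∈ pvChildren relations c) :
    pvBnd relations x m := by
  intro l y hp
  have := h (x :: l) y ⟨hx, by simpa using hp⟩
  simpa using this

theorem pvBnd_zero {relations : List (Int × Int)} {c : Int}
    (h : pvBnd relations c 0) : pvChildren relations c = [] := by
  rw [List.eq_nil_iff_forall_not_mem]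
  intro x hx
  have := h [] x ⟨hx, trivial⟩
  omega

-- pvP b c = number of manager chains from c of length ≤ b (counted with multiplicity), plus 1
def pvP (relations : List (Int × Int)) : Nat → Int → Nat
  | 0, _ => 1
  | b + 1, c => 1 + ((pvChildren relations c).map (pvP relations b)).sum

theorem pvP_pos (relations : List (Int × Int)) (b : Nat) (c : Int) : 1 ≤ pvP relations b c := by
  cases b <;> simp [pvP]

theorem pvP_stab {relations : List (Int × Int)} :
    ∀ (b : Nat) (c : Int), pvBnd relations c b → pvP relations (b + 1) c = pvP relations b c := by
  intro b
  induction b with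
  | zero =>
    intro c h
    simp [pvP, pvBnd_zero h]
  | succ b ih =>
    intro c h
    show 1 + ((pvChildren relations c).map (pvP relations (b + 1))).sum
        = 1 + ((pvChildren relations c).map (pvP relations b)).sum
    congr 1
    apply congrArg
    exact List.map_congr_left (fun x hx => ih x (pvBnd_child h hx))

theorem pvP_stab_ge {relations : List (Int × Int)} {c : Int} {m b : Nat}
    (h : pvBnd relations c m) (hb : m ≤ b) : pvP relations b c = pvP relations m c := by
  induction b, hb using Nat.le_induction with
  | base => rfl
  | succ b hb ih => rw [pvP_stab b c (pvBnd_mono h hb), ih]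

theorem pvP_le (relations : List (Int × Int)) (b : Nat) (c : Int) :
    pvP relations b c ≤ (relations.length + 1) ^ b := by
  induction b generalizing c with
  | zero => simp [pvP]
  | succ b ih =>
    have hlen : (pvChildren relations c).length ≤ relations.length := by
      have := (pv_children_sublist relations c).length_le
      simpa using this
    have hsum : ((pvChildren relations c).map (pvP relations b)).sum
        ≤ (pvChildren relations c).length * (relations.length + 1) ^ b := by
      have := List.sum_le_card_nsmul ((pvChildren relations c).map (pvP relations b))
        ((relations.length + 1) ^ b) (by
          intro x hx
          obtain ⟨y, _, rfl⟩ := List.mem_map.mp hx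
          exact ih y)
      simpa [smul_eq_mul] using this
    have h1 : pvP relations (b + 1) c
        ≤ 1 + relations.length * (relations.length + 1) ^ b := by
      show 1 + ((pvChildren relations c).map (pvP relations b)).sum ≤ _
      have := Nat.mul_le_mul_right ((relations.length + 1) ^ b) hlen
      omega
    have h2 : 1 + relations.length * (relations.length + 1) ^ b
        ≤ (relations.length + 1) ^ (b + 1) := by
      have hp1 : 1 ≤ (relations.length + 1) ^ b := Nat.one_le_pow _ _ (by omega)
      have : (relations.length + 1) ^ (b + 1)
          = (relations.length + 1) ^ b + relations.length * (relations.length + 1) ^ b := by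
        ring
      omega
    omega

-- termination mirror of the while loop: does it drain the queue within the given fuel?
def pvEmpties (relations : List (Int × Int)) : Nat → List Int → Bool
  | 0, q => q.isEmpty
  | _ + 1, [] => true
  | fuel + 1, cur :: qs => pvEmpties relations fuel (qs ++ pvChildren relations cur)

theorem pv_empties_of_bnd (relations : List (Int × Int)) :
    ∀ (fuel : Nat) (q : List Int),
      (∀ c ∈ q, pvBnd relations c relations.length) →
      (q.map (pvP relations relations.length)).sum ≤ fuel →
      pvEmpties relations fuel q = true := by
  intro fuel
  induction fuel with
  | zero =>
    intro q hB hW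
    cases q with
    | nil => rfl
    | cons a t =>
      exfalso
      have := pvP_pos relations relations.length a
      simp only [List.map_cons, List.sum_cons] at hW
      omega
  | succ fuel ih =>
    intro q hB hW
    cases q with
    | nil => rfl
    | cons cur qs =>
      show pvEmpties relations fuel (qs ++ pvChildren relations cur) = true
      have hBcur := hB cur (by simp)
      cases hn : relations.length with
      | zero =>
        have hC : pvChildren relations cur = [] := pvBnd_zero (hn ▸ hBcur)
        refine ih (qs ++ pvChildren relations cur) ?_ ?_
        · intro c hc
          rw [hC] at hc
          exact hB c (by simp at hc; simp [hc])
        · rw [hC]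
          simp only [List.append_nil]
          have := pvP_pos relations relations.length cur
          simp only [List.map_cons, List.sum_cons] at hW
          omega
      | succ m =>
        have hBc : ∀ x ∈ pvChildren relations cur, pvBnd relations x m :=
          fun x hx => pvBnd_child (hn ▸ hBcur) hx
        refine ih (qs ++ pvChildren relations cur) ?_ ?_
        · intro c hc
          rcases List.mem_append.mp hc with h | h
          · exact hB c (by simp [h])
          · exact hn ▸ pvBnd_mono (hBc c h) (by omega)
        · have hstab : ((pvChildren relations cur).map (pvP relations relations.length)).sum
              = ((pvChildren relations cur).map (pvP relations m)).sum := by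
            apply congrArg
            exact List.map_congr_left (fun x hx => hn ▸ pvP_stab_ge (hBc x hx) (by omega))
          have hPcur : pvP relations relations.length cur
              = 1 + ((pvChildren relations cur).map (pvP relations m)).sum := by
            rw [hn]; rfl
          simp only [List.map_append, List.sum_append, List.map_cons, List.sum_cons] at hW ⊢
          omega

theorem pv_bfs_of_empties (relations : List (Int × Int))
    {d : PySem.Dict Int (List Int)} (hd : ∀ c, d.getD c [] = pvChildren relations c) :
    ∀ (fuel : Nat) (q out : List Int),
      pvEmpties relations fuel q = true →
      (∀ p ∈ q, p ∈ out) →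
      ∀ x, x ∈ pvBfsA d fuel q out ↔ x ∈ out ∨ ∃ p ∈ q, pvReach relations p x := by
  intro fuel
  induction fuel with
  | zero =>
    intro q out hE _ x
    have hq : q = [] := by
      cases q with
      | nil => rfl
      | cons a t => simp [pvEmpties, List.isEmpty] at hE
    subst hq
    simp [pvBfsA]
  | succ fuel ih =>
    intro q out hE hsub x
    cases q with
    | nil => simp [pvBfsA]
    | cons cur qs =>
      rw [pv_bfs_step relations hd]
      have hE' : pvEmpties relations fuel (qs ++ pvChildren relations cur) = true := hE
      have hsub' : ∀ p ∈ qs ++ pvChildren relations cur, p ∈ out ++ pvChildren relations cur := by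
        intro p hp
        rcases List.mem_append.mp hp with h | h
        · exact List.mem_append.mpr (Or.inl (hsub p (by simp [h])))
        · exact List.mem_append.mpr (Or.inr h)
      rw [ih (qs ++ pvChildren relations cur) (out ++ pvChildren relations cur) hE' hsub' x]
      constructor
      · rintro (h | ⟨p, hp, hr⟩)
        · rcases List.mem_append.mp h with h | h
          · exact Or.inl h
          · exact Or.inr ⟨cur, by simp, ⟨[], ⟨h, trivial⟩⟩⟩
        · rcases List.mem_append.mp hp with h | h
          · exact Or.inr ⟨p, by simp [h], hr⟩
          · refine Or.inr ⟨cur, by simp, ?_⟩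
            obtain ⟨l, hl⟩ := hr
            exact ⟨p :: l, ⟨h, hl⟩⟩
      · rintro (h | ⟨p, hp, hr⟩)
        · exact Or.inl (List.mem_append.mpr (Or.inl h))
        · rcases List.mem_cons.mp hp with rfl | hq
          · obtain ⟨l, hl⟩ := hr
            cases l with
            | nil => exact Or.inl (List.mem_append.mpr (Or.inr hl.1))
            | cons a l' =>
              exact Or.inr ⟨a, List.mem_append.mpr (Or.inr hl.1), ⟨l', hl.2⟩⟩
          · exact Or.inr ⟨p, List.mem_append.mpr (Or.inl hq), hr⟩

-- under Pre_, every node reachable from g has all its outgoing paths of length ≤ relations.length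
theorem pv_bnd_of_pre (relations : List (Int × Int)) (g : Int)
    (hPre : Pre_get_all_reporters relations g) :
    ∀ c, pvReach relations g c → pvBnd relations c relations.length := by
  intro c hc l x hp
  have hnd : (l ++ [x]).Nodup := by
    by_contra hnd
    obtain ⟨y, hy, hcyc⟩ := pv_dup_cycle hp hnd
    have hgy : pvReach relations g y := pv_reach_trans hc (pv_reach_of_mem_path hp hy)
    have h1 : y ∈ pvDescend relations g := pv_descend_mem.mpr (pv_reach_bounded hgy)
    have h2 : y ∈ pvDescend relations y := pv_descend_mem.mpr (pv_reach_bounded hcyc)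
    exact hPre y h1 h2
  have hsub : (l ++ [x]) ⊆ relations.map Prod.fst := fun y hy => pv_path_mem_E hp y hy
  have := pv_len_le_of_nodup_subset hnd hsub
  simpa using this

theorem pv_final_eq (relations : List (Int × Int)) (g : Int)
    (hPre : Pre_get_all_reporters relations g) :
    get_all_reporters relations g = get_all_reporters_alt relations g := by
  have hd : ∀ c, (relations.foldl (fun d p => d.modify p.2 [] (fun l => l ++ [p.1])) PySem.Dict.empty).getD c []
      = pvChildren relations c := pv_dict_getD relations
  have hBndC : ∀ c ∈ pvChildren relations g, pvBnd relations c relations.length := by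
    intro c hc
    exact pv_bnd_of_pre relations g hPre c ⟨[], ⟨hc, trivial⟩⟩
  have hchlen : (pvChildren relations g).length ≤ relations.length := by
    have := (pv_children_sublist relations g).length_le
    simpa using this
  have hW : ((pvChildren relations g).map (pvP relations relations.length)).sum
      ≤ (relations.length + 1) ^ (relations.length + 1) := by
    have hsum := List.sum_le_card_nsmul ((pvChildren relations g).map (pvP relations relations.length))
      ((relations.length + 1) ^ relations.length) (by
        intro x hx
        obtain ⟨y, _, rfl⟩ := List.mem_map.mp hx
        exact pvP_le relations relations.length y)
    have h1 : ((pvChildren relations g).map (pvP relations relations.length)).sum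
        ≤ relations.length * (relations.length + 1) ^ relations.length := by
      have h2 := Nat.mul_le_mul_right ((relations.length + 1) ^ relations.length) hchlen
      simp only [smul_eq_mul, List.length_map] at hsum
      omega
    have h3 : relations.length * (relations.length + 1) ^ relations.length
        ≤ (relations.length + 1) ^ (relations.length + 1) := by
      have : (relations.length + 1) ^ (relations.length + 1)
          = (relations.length + 1) * (relations.length + 1) ^ relations.length := by ring
      have := Nat.mul_le_mul_right ((relations.length + 1) ^ relations.length)
        (show relations.length ≤ relations.length + 1 by omega)
      omega
    omega
  have hE : pvEmpties relations ((relations.length + 1) ^ (relations.length + 1))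
      (pvChildren relations g) = true :=
    pv_empties_of_bnd relations _ _ hBndC hW
  have hAset := pv_bfs_of_empties relations hd ((relations.length + 1) ^ (relations.length + 1))
    (pvChildren relations g) (pvChildren relations g) hE (fun p hp => hp)
  -- membership in A's collected list is exactly reachability from g
  have hAmem : ∀ x, x ∈ pvBfsA (relations.foldl (fun d p => d.modify p.2 [] (fun l => l ++ [p.1])) PySem.Dict.empty)
      ((relations.length + 1) ^ (relations.length + 1)) (pvChildren relations g) (pvChildren relations g)
      ↔ pvReach relations g x := by
    intro x
    rw [hAset x]
    constructor
    · rintro (h | ⟨p, hp, hr⟩)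
      · exact ⟨[], ⟨h, trivial⟩⟩
      · exact pv_reach_trans ⟨[], ⟨hp, trivial⟩⟩ hr
    · rintro ⟨l, hl⟩
      cases l with
      | nil => exact Or.inl hl.1
      | cons a l' => exact Or.inr ⟨a, hl.1, ⟨l', hl.2⟩⟩
  have hBmem : ∀ x, (x ∈ ((PySem.List.pyRange 0 relations.length 1).foldl
      (fun (st : PySem.Set Int × PySem.Set Int) _ =>
        let fr : PySem.Set Int :=
          PySem.Set.ofList (relations.filterMap (fun p => if p.2 ∈ st.1 then some p.1 else none))
        (fr, PySem.Set.union st.2 fr))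
      (PySem.Set.ofList [g], PySem.Set.empty)).2) ↔ pvReach relations g x := by
    intro x
    rw [pv_alt_fold_mem]
    constructor
    · rintro ⟨k, _, _, l, hp, _⟩; exact ⟨l, hp⟩
    · intro h; exact pv_reach_bounded h
  have hinit : (if (relations.foldl (fun d p => d.modify p.2 [] (fun l => l ++ [p.1])) PySem.Dict.empty).contains g = true
        then (relations.foldl (fun d p => d.modify p.2 [] (fun l => l ++ [p.1])) PySem.Dict.empty).getD g []
        else []) = pvChildren relations g := by
    by_cases h : (relations.foldl (fun d p => d.modify p.2 [] (fun l => l ++ [p.1])) PySem.Dict.empty).contains g = true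
    · rw [if_pos h, hd]
    · rw [if_neg h]
      have h2 := PySem.Dict.getD_of_not_contains
        (relations.foldl (fun d p => d.modify p.2 [] (fun l => l ++ [p.1])) PySem.Dict.empty)
        ([] : List Int) (Bool.eq_false_iff.mpr h)
      rw [hd] at h2
      exact h2.symm
  show PySem.List.sorted _ _ _ = PySem.List.sorted _ _ _
  rw [hinit]
  apply PySem.List.sorted_eq_sorted_of_perm
  · exact fun a b h => h
  · rw [List.perm_ext_iff_of_nodup (PySem.Set.nodup_ofList _) (pv_alt_fold_nodup relations g)]
    intro a
    rw [PySem.Set.mem_ofList, hAmem a, hBmem a]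

-- ===== VERDICT (by name: the statement is the Claim_ definition above) =====
theorem get_all_reporters_spec : Claim_equal_get_all_reporters := by
  intro relations given_manager_id _ hPre
  unfold Spec_get_all_reporters
  exact pv_final_eq relations given_manager_id hPre
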